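-- pv_equiv track=rewrite | github.com/scottmsilver/treddy | python/tests/test_server_integration.py | simulate_voice_fsm
-- ===== SOURCE A (Python) =====
-- def simulate_voice_fsm(events):
--     """Simulate the voice state machine with userActivated guard.
--
--     Args:
--         events: list of event strings:
--             "toggle"         — user taps voice button
--             "connected"      — Gemini connection established
--             "speaking_start" — Gemini starts speaking
--             "speaking_end"   — Gemini finishes speaking
--             "disconnected"   — connection lost
--
--     Returns:
--         list of (event, state, userActivated) tuples after each event.
--     """
--     state = "idle"
--     user_activated = False
--     is_connected = False
--     trace = []
--
--     for event in events:
--         if event == "toggle":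
--             if state == "idle":
--                 user_activated = True
--                 if is_connected:
--                     state = "listening"
--                 else:
--                     state = "connecting"
--             elif state == "connecting":
--                 user_activated = False
--                 state = "idle"
--             elif state == "listening":
--                 user_activated = False
--                 state = "idle"
--             elif state == "speaking":
--                 # interrupt
--                 state = "listening"
--
--         elif event == "connected":
--             is_connected = True
--             if state == "connecting":
--                 state = "listening"
--
--         elif event == "speaking_start":
--             state = "speaking"
--
--         elif event == "speaking_end":
--             if user_activated:
--                 state = "listening"
--             else:
--                 state = "idle"
--
--         elif event == "disconnected":
--             is_connected = False
--             user_activated = False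
--             state = "idle"
--
--         trace.append((event, state, user_activated))
--
--     return trace
-- ===== SOURCE B (Python) =====
-- def simulate_voice_fsm(events):
--     # Two staged passes: the connection flag depends only on the event stream,
--     # so pass 1 precomputes its value before each event; pass 2 then drives
--     # state/user_activated over events paired with that flag.
--     ic_before = []
--     ic = False
--     for e in events:
--         ic_before.append(ic)
--         if e == "connected":
--             ic = True
--         elif e == "disconnected":
--             ic = False
--
--     state, ua = "idle", False
--     trace = []
--     for e, ic0 in zip(events, ic_before):
--         match (e, state):
--             case ("toggle", "idle"):
--                 ua, state = True, ("listening" if ic0 else "connecting")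
--             case ("toggle", "connecting") | ("toggle", "listening"):
--                 ua, state = False, "idle"
--             case ("toggle", "speaking"):
--                 state = "listening"
--             case ("connected", "connecting"):
--                 state = "listening"
--             case ("speaking_start", _):
--                 state = "speaking"
--             case ("speaking_end", _):
--                 state = "listening" if ua else "idle"
--             case ("disconnected", _):
--                 ua, state = False, "idle"
--             case _:
--                 pass
--         trace.append((e, state, ua))
--     return trace
-- ===== Notes on version B (the rewrite author's own statement) =====
-- stated objective: alternative
-- what changed: Split A's single fused loop into two staged passes: pass 1 precomputes the connection flag (which depends only on connected/disconnected events) before each event, pass 2 drives state/user_activated over events zipped with that flag via a pattern match on (event, state).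
import Mathlib
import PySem

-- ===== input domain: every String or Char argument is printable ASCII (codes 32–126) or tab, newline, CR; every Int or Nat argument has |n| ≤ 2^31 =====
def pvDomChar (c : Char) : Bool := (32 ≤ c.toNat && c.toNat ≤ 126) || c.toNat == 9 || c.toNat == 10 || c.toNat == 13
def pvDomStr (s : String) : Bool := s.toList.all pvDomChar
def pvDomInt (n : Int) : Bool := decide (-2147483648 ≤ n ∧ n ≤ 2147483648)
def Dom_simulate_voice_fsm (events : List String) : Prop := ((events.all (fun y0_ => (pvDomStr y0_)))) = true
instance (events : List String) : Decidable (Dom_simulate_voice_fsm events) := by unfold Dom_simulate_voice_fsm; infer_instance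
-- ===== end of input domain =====

-- B splits A's single fused loop into two staged passes: pass 1 precomputes the connection
-- flag before each event, pass 2 drives state/user_activated over events zipped with it.

-- ===== PORT A =====
-- loop body of A, step for step (branches in A's order)
def pvStepA (st : String × Bool × Bool) (event : String) : String × Bool × Bool :=
  let state := st.1
  let ua := st.2.1
  let ic := st.2.2
  if event = "toggle" then
    if state = "idle" then ((if ic then "listening" else "connecting"), true, ic)
    else if state = "connecting" then ("idle", false, ic)
    else if state = "listening" then ("idle", false, ic)
    else if state = "speaking" then ("listening", ua, ic)
    else (state, ua, ic)
  else if event = "connected" then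
    ((if state = "connecting" then "listening" else state), ua, true)
  else if event = "speaking_start" then
    ("speaking", ua, ic)
  else if event = "speaking_end" then
    ((if ua then "listening" else "idle"), ua, ic)
  else if event = "disconnected" then
    ("idle", false, false)
  else (state, ua, ic)

def simulate_voice_fsm (events : List String) : List (String × String × Bool) :=
  (events.foldl
    (fun (acc : (String × Bool × Bool) × List (String × String × Bool)) event =>
      let st := pvStepA acc.1 event
      (st, acc.2 ++ [(event, st.1, st.2.1)]))
    (("idle", false, false), [])).2

-- ===== PORT B =====
-- pass 1 body: the connection flag, which depends only on the event
def pvIcStep (ic : Bool) (e : String) : Bool :=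
  if e = "connected" then true else if e = "disconnected" then false else ic

-- pass 2 body: state/user_activated transition, given the flag paired with the event
def pvStepB (st : String × Bool) (p : String × Bool) : String × Bool :=
  let e := p.1
  let ic0 := p.2
  let state := st.1
  let ua := st.2
  if e = "toggle" ∧ state = "idle" then ((if ic0 then "listening" else "connecting"), true)
  else if e = "toggle" ∧ (state = "connecting" ∨ state = "listening") then ("idle", false)
  else if e = "toggle" ∧ state = "speaking" then ("listening", ua)
  else if e = "connected" ∧ state = "connecting" then ("listening", ua)
  else if e = "speaking_start" then ("speaking", ua)
  else if e = "speaking_end" then ((if ua then "listening" else "idle"), ua)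
  else if e = "disconnected" then ("idle", false)
  else (state, ua)

def simulate_voice_fsm_alt (events : List String) : List (String × String × Bool) :=
  let ic_before :=
    (events.foldl (fun (acc : Bool × List Bool) e => (pvIcStep acc.1 e, acc.2 ++ [acc.1]))
      (false, [])).2
  ((events.zip ic_before).foldl
    (fun (acc : (String × Bool) × List (String × String × Bool)) p =>
      let st := pvStepB acc.1 p
      (st, acc.2 ++ [(p.1, st.1, st.2)]))
    (("idle", false), [])).2

-- ===== PRECONDITION & SPEC =====
def Spec_simulate_voice_fsm (events : List String) (out : List (String × String × Bool)) : Prop := out = simulate_voice_fsm_alt events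
instance (events : List String) (out : List (String × String × Bool)) : Decidable (Spec_simulate_voice_fsm events out) := by unfold Spec_simulate_voice_fsm; infer_instance

-- ===== CLAIM (what is proved, stated in full; the proofs are below) =====
def Claim_equal_simulate_voice_fsm : Prop := ∀ (events : List String), Dom_simulate_voice_fsm events → Spec_simulate_voice_fsm events (simulate_voice_fsm events)

-- ===== LEMMAS AND PROOFS =====

-- recursion view of pass 1's list of before-event flags
def pvIcRec (ic : Bool) (events : List String) : List Bool :=
  match events with
  | [] => []
  | e :: rest => ic :: pvIcRec (pvIcStep ic e) rest

theorem pvIc_fold_eq (events : List String) (ic : Bool) (tr : List Bool) :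
    (events.foldl (fun (acc : Bool × List Bool) e => (pvIcStep acc.1 e, acc.2 ++ [acc.1]))
      (ic, tr)).2 = tr ++ pvIcRec ic events := by
  induction events generalizing ic tr with
  | nil => simp [pvIcRec]
  | cons e rest ih => simp [pvIcRec, ih, List.append_assoc]

def pvReachable (s : String) : Prop :=
  s = "idle" ∨ s = "connecting" ∨ s = "listening" ∨ s = "speaking"

-- A's step factors into pass 1's flag step and pass 2's state/ua step on reachable states
theorem pvStep_ic (s : String) (ua ic : Bool) (e : String) :
    (pvStepA (s, ua, ic) e).2.2 = pvIcStep ic e := by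
  simp only [pvStepA, pvIcStep]
  split_ifs <;> simp_all

set_option maxHeartbeats 1000000 in
theorem pvStep_su (s : String) (hs : pvReachable s) (ua ic : Bool) (e : String) :
    ((pvStepA (s, ua, ic) e).1, (pvStepA (s, ua, ic) e).2.1) = pvStepB (s, ua) (e, ic) := by
  by_cases h1 : e = "toggle" <;>
  by_cases h2 : e = "connected" <;>
  by_cases h3 : e = "speaking_start" <;>
  by_cases h4 : e = "speaking_end" <;>
  by_cases h5 : e = "disconnected" <;>
  rcases hs with rfl | rfl | rfl | rfl <;>
  subst_vars <;>
  simp_all [pvStepA, pvStepB]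

theorem pvStep_closed (s : String) (hs : pvReachable s) (ua ic : Bool) (e : String) :
    pvReachable (pvStepA (s, ua, ic) e).1 := by
  rcases hs with rfl | rfl | rfl | rfl <;>
  simp only [pvStepA, pvReachable] <;>
  split_ifs <;> simp

theorem pvFold_eq (events : List String) (s : String) (ua ic : Bool)
    (tr : List (String × String × Bool)) (hs : pvReachable s) :
    (events.foldl
      (fun (acc : (String × Bool × Bool) × List (String × String × Bool)) event =>
        let st := pvStepA acc.1 event
        (st, acc.2 ++ [(event, st.1, st.2.1)])) ((s, ua, ic), tr)).2 =
    ((events.zip (pvIcRec ic events)).foldl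
      (fun (acc : (String × Bool) × List (String × String × Bool)) p =>
        let st := pvStepB acc.1 p
        (st, acc.2 ++ [(p.1, st.1, st.2)])) ((s, ua), tr)).2 := by
  induction events generalizing s ua ic tr with
  | nil => rfl
  | cons e rest ih =>
    simp only [pvIcRec, List.zip_cons_cons, List.foldl_cons]
    have hic := pvStep_ic s ua ic e
    have hsu := pvStep_su s hs ua ic e
    have hcl := pvStep_closed s hs ua ic e
    rcases hA : pvStepA (s, ua, ic) e with ⟨s', ua', ic'⟩
    rw [hA] at hic hsu hcl
    simp only at hic hsu
    rw [← hsu, hic] at *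
    exact ih s' ua' (pvIcStep ic e) _ hcl

-- ===== VERDICT (by name: the statement is the Claim_ definition above) =====
theorem simulate_voice_fsm_spec : Claim_equal_simulate_voice_fsm := by
  intro events _
  unfold Spec_simulate_voice_fsm simulate_voice_fsm simulate_voice_fsm_alt
  simp only [pvIc_fold_eq, List.nil_append]
  exact pvFold_eq events "idle" false false [] (Or.inl rfl)
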